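-- pv_equiv track=rewrite | github.com/JoseCarlos458/swirlSearch | swirl/processors/utils.py | match_all
-- ===== SOURCE A (Python) =====
-- def match_all(list_find, list_targets):
--
--     match_list = []
--     if not list_targets:
--         return match_list
--
--     if not list_find:
--         return match_list
--
--     find = ' '.join(list_find).lower()
--
--     p = 0
--     while p < len(list_targets):
--         if find in ' '.join(list_targets[p:p+len(list_find)]).lower():
--             match_list.append(p)
--         p = p + 1
--
--     return match_list
-- ===== SOURCE B (Python) =====
-- def match_all(list_find, list_targets):
--     if not list_targets or not list_find:
--         return []
--     find = ' '.join(list_find).lower()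
--     full = ' '.join(list_targets).lower()
--     m = len(list_find)
--     n = len(list_targets)
--     # starts[p] = character offset of token p in full; starts[n] = len(full) + 1
--     starts = []
--     acc = 0
--     for t in list_targets:
--         starts.append(acc)
--         acc += len(t) + 1
--     starts.append(acc)
--     return [p for p in range(n)
--             if find in full[starts[p] : starts[min(p + m, n)] - 1]]
-- ===== Notes on version B (the rewrite author's own statement) =====
-- stated objective: faster
-- what changed: B joins and lowercases the targets once and precomputes cumulative character offsets, so each window test becomes a substring check on a slice of the one precomputed string instead of re-joining and re-lowercasing every window.
import Mathlib
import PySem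

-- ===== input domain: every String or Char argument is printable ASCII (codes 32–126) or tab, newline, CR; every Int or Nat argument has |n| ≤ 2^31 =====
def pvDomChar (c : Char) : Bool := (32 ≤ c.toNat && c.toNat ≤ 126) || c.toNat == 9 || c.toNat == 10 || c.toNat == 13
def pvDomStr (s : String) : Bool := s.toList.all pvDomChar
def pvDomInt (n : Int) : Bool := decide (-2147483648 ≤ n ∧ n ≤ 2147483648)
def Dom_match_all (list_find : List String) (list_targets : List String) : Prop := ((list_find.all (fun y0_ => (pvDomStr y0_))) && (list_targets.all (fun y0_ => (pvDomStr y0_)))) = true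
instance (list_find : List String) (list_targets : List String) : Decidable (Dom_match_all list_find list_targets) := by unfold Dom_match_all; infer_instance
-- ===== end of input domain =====

-- B joins and lowercases the targets ONCE and precomputes character offsets, so each
-- window test is a substring check on a slice of the precomputed string instead of a
-- fresh join+lower of the window (objective: faster, constant-factor).

-- ===== PORT A =====
def match_all (list_find : List String) (list_targets : List String) : List Int :=
  if list_targets = [] then []
  else if list_find = [] then []
  else
    let find := PySem.Str.lower (PySem.Str.join " " list_find)
    -- while p < len(list_targets): … ; p = p + 1   (counting loop = fold over range(len))
    (PySem.List.pyRange 0 (list_targets.length : Int) 1).foldl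
      (fun acc p =>
        if PySem.Str.isIn find (PySem.Str.lower (PySem.Str.join " "
            (PySem.List.slice list_targets (some p) (some (p + (list_find.length : Int)))))) then
          acc ++ [p]
        else acc) []

-- ===== PORT B =====
def match_all_alt (list_find : List String) (list_targets : List String) : List Int :=
  if list_targets = [] ∨ list_find = [] then []
  else
    let find := PySem.Str.lower (PySem.Str.join " " list_find)
    let full := PySem.Str.lower (PySem.Str.join " " list_targets)
    let m : Int := (list_find.length : Int)
    let n : Int := (list_targets.length : Int)
    -- starts[p] = character offset of token p in full; one sentinel entry at the end
    let sa := list_targets.foldl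
      (fun (sa : List Int × Int) t => (sa.1 ++ [sa.2], sa.2 + PySem.Str.len t + 1)) ([], 0)
    let starts := sa.1 ++ [sa.2]
    (PySem.List.pyRange 0 n 1).filter (fun p =>
      PySem.Str.isIn find (PySem.Str.slice full (some (PySem.List.pyGetD starts p 0))
        (some (PySem.List.pyGetD starts (min (p + m) n) 0 - 1))))

-- ===== PRECONDITION & SPEC =====
def Spec_match_all (list_find : List String) (list_targets : List String) (out : List Int) : Prop := out = match_all_alt list_find list_targets
instance (list_find : List String) (list_targets : List String) (out : List Int) : Decidable (Spec_match_all list_find list_targets out) := by unfold Spec_match_all; infer_instance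

-- ===== CLAIM (what is proved, stated in full; the proofs are below) =====
def Claim_equal_match_all : Prop := ∀ (list_find : List String) (list_targets : List String), Dom_match_all list_find list_targets → Spec_match_all list_find list_targets (match_all list_find list_targets)

-- ===== LEMMAS AND PROOFS =====

def pvS (ts : List (List Char)) : Nat := (ts.map (fun t => t.length + 1)).sum

theorem pv_ic (α : Type) (s a b : List α) (l : List (List α)) :
    List.intercalate s (a :: b :: l) = a ++ s ++ List.intercalate s (b :: l) := by
  simp [List.intercalate, List.intersperse]
theorem pv_ic1 (α : Type) (s a : List α) :
    List.intercalate s [a] = a := by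
  simp [List.intercalate]

theorem pvS_append (a b : List (List Char)) : pvS (a ++ b) = pvS a + pvS b := by
  simp [pvS]

theorem pvS_take_ge (ts : List (List Char)) (j : Nat) : min j ts.length ≤ pvS (ts.take j) := by
  induction ts generalizing j with
  | nil => simp
  | cons t rest ih =>
    cases j with
    | zero => simp
    | succ j =>
      have := ih j
      simp [pvS, Nat.succ_min_succ] at this ⊢
      omega

theorem pv_join_drop (k : Nat) (ts : List (List Char)) (hk : k < ts.length) :
    List.intercalate [' '] (ts.drop k)
      = (List.intercalate [' '] ts).drop (pvS (ts.take k)) := by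
  induction k generalizing ts with
  | zero => simp [pvS]
  | succ k ih =>
    match ts with
    | [] => simp at hk
    | t :: rest =>
      have hr : rest ≠ [] := by
        intro h; subst h; simp at hk
      match rest, hr with
      | u :: us, _ =>
        rw [List.drop_succ_cons, ih (u :: us) (by simpa using hk), pv_ic]
        have : pvS ((t :: u :: us).take (k + 1))
            = (t ++ [' ']).length + pvS ((u :: us).take k) := by
          simp [pvS]
        rw [this, List.drop_length_add_append]

theorem pv_join_take (ts : List (List Char)) (m : Nat) (hts : ts ≠ []) (hm : 0 < m) :
    List.intercalate [' '] (ts.take m)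
      = (List.intercalate [' '] ts).take (pvS (ts.take (min m ts.length)) - 1) := by
  induction ts generalizing m with
  | nil => simp at hts
  | cons t rest ih =>
    match rest with
    | [] =>
      match m, hm with
      | m' + 1, _ =>
        simp [pv_ic1, pvS]
    | u :: us =>
      match m, hm with
      | 1, _ =>
        rw [pv_ic]
        have h1 : min 1 (t :: u :: us).length = 1 := by simp
        rw [h1]
        simp only [List.take_succ_cons, List.take_zero, pv_ic1]
        have h2 : pvS [t] - 1 = t.length := by simp [pvS]
        rw [h2, List.append_assoc, List.take_left]
      | m' + 2, _ =>
        have key := ih (m' + 1) (by simp) (by omega)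
        have hj : 1 ≤ min (m' + 1) (u :: us).length := by simp
        have hge : 1 ≤ pvS ((u :: us).take (min (m' + 1) (u :: us).length)) := by
          have := pvS_take_ge (u :: us) (min (m' + 1) (u :: us).length)
          omega
        have hmin : min (m' + 2) (t :: u :: us).length
            = min (m' + 1) (u :: us).length + 1 := by
          simp [List.length_cons]
        rw [List.take_succ_cons]
        have hconsform : List.take (m' + 1) (u :: us) = u :: List.take m' us := by simp
        rw [hconsform] at key ⊢
        rw [pv_ic, key, pv_ic, hmin]
        have hS : pvS (List.take (min (m' + 1) (u :: us).length + 1) (t :: u :: us)) - 1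
            = (t ++ [' ']).length + (pvS (List.take (min (m' + 1) (u :: us).length) (u :: us)) - 1) := by
          simp [pvS]; omega
        rw [hS, List.append_assoc, List.take_length_add_append, ← List.append_assoc]

theorem pv_window (ts : List (List Char)) (k m : Nat) (hk : k < ts.length) (hm : 0 < m) :
    List.intercalate [' '] ((ts.drop k).take m)
      = ((List.intercalate [' '] ts).drop (pvS (ts.take k))).take
          (pvS (ts.take (min (k + m) ts.length)) - 1 - pvS (ts.take k)) := by
  have hd : ts.drop k ≠ [] := by
    intro h
    have := congrArg List.length h
    simp at this
    omega
  rw [pv_join_take (ts.drop k) m hd hm, pv_join_drop k ts hk]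
  congr 1
  have hlen : (ts.drop k).length = ts.length - k := by simp
  have hsplit : ts.take (min (k + m) ts.length)
      = ts.take k ++ (ts.drop k).take (min m (ts.length - k)) := by
    have h1 : min (k + m) ts.length = k + min m (ts.length - k) := by omega
    rw [h1, List.take_add]
  have hge : 1 ≤ pvS ((ts.drop k).take (min m (ts.length - k))) := by
    have := pvS_take_ge (ts.drop k) (min m (ts.length - k))
    rw [hlen] at this
    omega
  rw [hlen, hsplit, pvS_append]
  omega

theorem pv_map_intercalate (f : Char → Char) (s : List Char) (l : List (List Char)) :
    List.map f (List.intercalate s l)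
      = List.intercalate (List.map f s) (List.map (List.map f) l) := by
  induction l with
  | nil => simp [List.intercalate]
  | cons a rest ih =>
    cases rest with
    | nil => simp [pv_ic1]
    | cons b bs =>
      simp only [List.map_cons]
      rw [pv_ic, pv_ic]
      simp only [List.map_append]
      rw [← List.map_cons, ih]

theorem pv_lower_join (parts : List (List Char)) :
    PySem.Chars.lower (PySem.Chars.join [' '] parts)
      = List.intercalate [' '] (parts.map PySem.Chars.lower) := by
  have h : PySem.Chars.lowerChar ' ' = ' ' := by decide
  simp only [PySem.Chars.lower, PySem.Chars.join, pv_map_intercalate, List.map_cons,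
    List.map_nil, h]
  rfl

theorem pv_starts_spec (T : List String) (acc : List Int) (c : Int) :
    T.foldl (fun (sa : List Int × Int) t => (sa.1 ++ [sa.2], sa.2 + PySem.Str.len t + 1)) (acc, c)
      = (acc ++ (List.range T.length).map
            (fun i => c + (pvS ((T.take i).map String.toList) : Int)),
         c + (pvS (T.map String.toList) : Int)) := by
  induction T generalizing acc c with
  | nil => simp [pvS]
  | cons t rest ih =>
    rw [List.foldl_cons, ih]
    simp only [Prod.mk.injEq]
    refine ⟨?_, ?_⟩
    · rw [List.length_cons, List.range_succ_eq_map, List.map_cons, List.map_map,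
        List.append_assoc]
      congr 1
      simp only [pvS, PySem.Str.len_eq]
      push_cast
      simp only [List.take_zero, List.map_nil, List.sum_nil, add_zero, List.singleton_append]
      congr 1
      refine List.map_congr_left fun i hi => ?_
      simp only [Function.comp, List.take_succ_cons, List.map_cons, List.sum_cons]
      push_cast
      ring
    · simp only [List.map_cons, pvS, List.map_cons, List.sum_cons, PySem.Str.len_eq]
      push_cast [pvS]
      ring


theorem pv_getD_starts (g : Nat → Int) (v : Int) (n j : Nat) (hj : j ≤ n) (hv : v = g n) :
    PySem.List.pyGetD ((List.range n).map g ++ [v]) (j : Int) 0 = g j := by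
  rw [PySem.List.pyGetD_natCast]
  rcases Nat.lt_or_ge j n with h | h
  · rw [List.getD_eq_getElem _ _ (by simpa using Nat.lt_succ_of_lt h)]
    rw [List.getElem_append_left (by simpa using h)]
    simp
  · have hj' : j = n := by omega
    subst hj'
    rw [List.getD_eq_getElem _ _ (by simp)]
    rw [List.getElem_append_right (by simp)]
    simp [hv]

theorem pvS_map_lower (l : List (List Char)) :
    pvS (l.map PySem.Chars.lower) = pvS l := by
  simp only [pvS, List.map_map]
  congr 1
  refine List.map_congr_left fun t ht => ?_
  simp [PySem.Chars.lower]

-- ===== VERDICT (by name: the statement is the Claim_ definition above) =====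
theorem match_all_spec : Claim_equal_match_all := by
  intro F T _
  unfold Spec_match_all
  by_cases hT : T = []
  · simp [match_all, match_all_alt, hT]
  by_cases hF : F = []
  · simp [match_all, match_all_alt, hT, hF]
  unfold match_all match_all_alt
  rw [if_neg hT, if_neg hF, if_neg (by simp [hT, hF] : ¬(T = [] ∨ F = []))]
  rw [PySem.List.foldl_append_if (f := fun (p : Int) => p)]
  simp only [List.map_id', List.nil_append]
  rw [pv_starts_spec]
  refine List.filter_congr ?_
  intro p hp
  rw [PySem.List.mem_pyRange_one] at hp
  obtain ⟨hp0, hpn⟩ := hp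
  obtain ⟨k, rfl⟩ : ∃ k : Nat, p = (k : Int) := ⟨p.toNat, (Int.toNat_of_nonneg hp0).symm⟩
  have hk : k < T.length := by exact_mod_cast hpn
  have hm : 0 < F.length := List.length_pos_iff.mpr hF
  have hn : 0 < T.length := List.length_pos_iff.mpr hT
  simp only [List.nil_append, zero_add]
  -- indices as Nat casts
  have hab : ((k : Int) + (F.length : Int)) = ((k + F.length : Nat) : Int) := by push_cast; ring
  have hmin : min ((k : Int) + (F.length : Int)) (T.length : Int)
      = ((min (k + F.length) T.length : Nat) : Int) := by
    rw [Nat.cast_min, Nat.cast_add]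
  rw [hmin, hab, PySem.List.slice_natCast, Nat.add_sub_cancel_left]
  -- resolve the two offset lookups
  rw [pv_getD_starts _ _ _ _ (le_of_lt hk) (by rw [List.take_length]),
      pv_getD_starts _ _ _ _ (by omega) (by rw [List.take_length])]
  -- move to lowered character lists
  set ts := (T.map String.toList).map PySem.Chars.lower with hts
  have htslen : ts.length = T.length := by simp [hts]
  have hpvs : ∀ i, pvS ((T.take i).map String.toList) = pvS (ts.take i) := by
    intro i
    rw [hts, ← List.map_take, ← List.map_take, pvS_map_lower]
  rw [hpvs, hpvs]
  set j := min (k + F.length) T.length with hj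
  have hj1 : 1 ≤ j := by omega
  have h1le : 1 ≤ pvS (ts.take j) := by
    have := pvS_take_ge ts j
    omega
  have hbcast : ((pvS (ts.take j) : Int)) - 1 = ((pvS (ts.take j) - 1 : Nat) : Int) := by
    omega
  rw [hbcast]
  have hsp : " ".toList = [' '] := by decide
  simp only [PySem.Str.isIn_eq, PySem.Str.toList_lower, PySem.Str.toList_join,
    PySem.Str.toList_slice, PySem.Chars.slice_eq_listSlice, hsp]
  rw [pv_lower_join, pv_lower_join, PySem.List.slice_natCast, pv_lower_join]
  rw [List.map_take, List.map_drop, List.map_take, List.map_drop, ← hts]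
  have hw := pv_window ts k F.length (by omega) hm
  rw [htslen, ← hj] at hw
  rw [hw]
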